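-- pv_equiv track=rewrite | github.com/volcengine/verl | atropos/environments/intern_bootcamp/internbootcamp_lib/internbootcamp/bootcamp/cpartialsums/cpartialsums.py | _generate_expected_output
-- ===== SOURCE A (Python) =====
-- MOD = 10**9 + 7
--
-- def _generate_expected_output(n, k, a):
--     l = [1]
--     res = []
--     for i in range(n):
--         res.append(sum(l[j] * a[i-j] % MOD for j in range(i+1)) % MOD)
--         next_l = l[-1] * (i + k) % MOD
--         inv_denominator = pow(i+1, MOD-2, MOD)
--         l.append(next_l * inv_denominator % MOD)
--     return res
-- ===== SOURCE B (Python) =====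
-- MOD = 10**9 + 7
--
-- def _generate_expected_output(n, k, a):
--     # transposed (scatter) convolution: one running coefficient scalar, no
--     # coefficient list; each column j adds its contribution to every res[i]
--     res = [0] * n
--     lj = 1
--     for j in range(n):
--         res = [(r + lj * a[i - j]) % MOD if i >= j else r
--                for i, r in enumerate(res)]
--         lj = lj * (j + k) % MOD * pow(j + 1, MOD - 2, MOD) % MOD
--     return res
-- ===== Notes on version B (the rewrite author's own statement) =====
-- stated objective: alternative
-- what changed: A gathers each output with an inner sum over a stored coefficient list l; B computes the same convolution transposed: a single running coefficient scalar scatters each column j into all res[i] (i >= j), accumulating mod as it goes, with no coefficient list.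
-- outside the precondition, e.g. on _generate_expected_output(2, 3, [5]): A raises IndexError, B raises IndexError
import Mathlib
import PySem

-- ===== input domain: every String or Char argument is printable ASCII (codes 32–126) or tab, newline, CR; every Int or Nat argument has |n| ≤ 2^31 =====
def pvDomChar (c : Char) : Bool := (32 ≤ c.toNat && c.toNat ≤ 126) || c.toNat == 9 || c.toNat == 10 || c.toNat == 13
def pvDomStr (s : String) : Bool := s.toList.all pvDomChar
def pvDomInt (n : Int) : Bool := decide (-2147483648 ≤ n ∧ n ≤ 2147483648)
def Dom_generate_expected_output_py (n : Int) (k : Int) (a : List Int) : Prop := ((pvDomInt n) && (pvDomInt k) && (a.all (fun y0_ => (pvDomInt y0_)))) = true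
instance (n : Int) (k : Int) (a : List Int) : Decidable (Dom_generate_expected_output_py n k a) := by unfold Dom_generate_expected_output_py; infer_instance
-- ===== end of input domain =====

-- B replaces A's per-output gather (inner sum over a stored coefficient list) by a
-- transposed scatter convolution with a single running coefficient scalar; objective:
-- alternative (same O(n^2) cost, different loop structure).

def pvM : Int := 1000000007

-- pow(b, e, m) for m = pvM: square-and-multiply. PySem.Int.powMod is the named port of
-- Python's three-argument pow, but it computes b^e in full and cannot be evaluated at
-- e = 10^9+5; pvPowMod computes the same value (proved in pvPowMod_eq below, which the
-- equivalence proof uses) in O(log e) multiplications.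
def pvPowModGo (m : Int) (e : Nat) (b acc : Int) : Int :=
  if h : e = 0 then acc
  else pvPowModGo m (e / 2) (b * b % m) (if e % 2 = 1 then acc * b % m else acc)
termination_by e
decreasing_by exact Nat.div_lt_self (Nat.pos_of_ne_zero h) (by norm_num)

def pvPowMod (b : Int) (e : Nat) (m : Int) : Int := pvPowModGo m e (b % m) (1 % m)

-- ===== PORT A =====
def generate_expected_output_py (n : Int) (k : Int) (a : List Int) : List Int :=
  ((PySem.List.pyRange 0 n 1).foldl (fun (st : List Int × List Int) i =>
      let l := st.1
      let res := st.2 ++ [PySem.Int.mod (((PySem.List.pyRange 0 (i+1) 1).map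
        (fun j => PySem.Int.mod (PySem.List.pyGetD l j 0 * PySem.List.pyGetD a (i - j) 0) pvM)).sum) pvM]
      let next_l := PySem.Int.mod (PySem.List.pyGetD l (-1) 0 * (i + k)) pvM
      let inv_denominator := pvPowMod (i+1) 1000000005 pvM
      (l ++ [PySem.Int.mod (next_l * inv_denominator) pvM], res))
    ([1], [])).2

-- ===== PORT B =====
def generate_expected_output_py_alt (n : Int) (k : Int) (a : List Int) : List Int :=
  ((PySem.List.pyRange 0 n 1).foldl (fun (st : List Int × Int) j =>
      let lj := st.2
      let res := (PySem.List.enumerate st.1).map (fun p =>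
        if p.1 ≥ j then PySem.Int.mod (p.2 + lj * PySem.List.pyGetD a (p.1 - j) 0) pvM else p.2)
      (res, PySem.Int.mod (PySem.Int.mod (lj * (j + k)) pvM * pvPowMod (j+1) 1000000005 pvM) pvM))
    (List.replicate n.toNat 0, 1)).1

-- ===== PRECONDITION & SPEC =====
-- Pre_ excludes n > len(a): there both Pythons raise IndexError (a[i] with i ≥ len(a)).
def Pre_generate_expected_output_py (n : Int) (k : Int) (a : List Int) : Prop :=
  n ≤ (a.length : Int)
instance (n : Int) (k : Int) (a : List Int) : Decidable (Pre_generate_expected_output_py n k a) := by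
  unfold Pre_generate_expected_output_py; infer_instance

def pvWitness_generate_expected_output_py : Int × Int × List Int := (2, 5, [1, 2, 3])

def Spec_generate_expected_output_py (n : Int) (k : Int) (a : List Int) (out : List Int) : Prop := out = generate_expected_output_py_alt n k a
instance (n : Int) (k : Int) (a : List Int) (out : List Int) : Decidable (Spec_generate_expected_output_py n k a out) := by unfold Spec_generate_expected_output_py; infer_instance

-- ===== CLAIM (what is proved, stated in full; the proofs are below) =====
def Claim_equal_generate_expected_output_py : Prop := ∀ (n : Int) (k : Int) (a : List Int), Dom_generate_expected_output_py n k a → Pre_generate_expected_output_py n k a → Spec_generate_expected_output_py n k a (generate_expected_output_py n k a)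

-- ===== LEMMAS AND PROOFS =====

-- the coefficient sequence both programs maintain (A as list l, B as scalar lj)
def pvCoef (k : Int) : Nat → Int
  | 0 => 1
  | j+1 => PySem.Int.mod (PySem.Int.mod (pvCoef k j * ((j : Int) + k)) pvM *
             PySem.Int.powMod ((j : Int)+1) 1000000005 pvM) pvM

def pvC (k : Int) (j : Int) : Int := pvCoef k j.toNat

-- A's i-th output element
def pvOutA (k : Int) (a : List Int) (i : Int) : Int :=
  PySem.Int.mod (((PySem.List.pyRange 0 (i+1) 1).map
    (fun j => PySem.Int.mod (pvC k j * PySem.List.pyGetD a (i - j) 0) pvM)).sum) pvM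

-- B's value at position i after the first J columns
def pvPart (k : Int) (a : List Int) (i : Int) (J : Nat) : Int :=
  (PySem.List.pyRange 0 (J : Int) 1).foldl
    (fun r j => if i ≥ j then PySem.Int.mod (r + pvC k j * PySem.List.pyGetD a (i - j) 0) pvM else r) 0

theorem pvmod_eq (x : Int) : PySem.Int.mod x pvM = x % pvM :=
  PySem.Int.mod_eq_emod_of_pos (by norm_num [pvM])

theorem pvPow_emod (a : Int) (b : Nat) (n : Int) : (a % n) ^ b % n = a ^ b % n := by
  induction b with
  | zero => simp
  | succ b ih =>
      rw [pow_succ, pow_succ, Int.mul_emod, ih, Int.emod_emod_of_dvd _ dvd_rfl, ← Int.mul_emod]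

theorem pvPowModGo_spec (m : Int) : ∀ (e : Nat) (b acc : Int), acc % m = acc →
    pvPowModGo m e b acc = acc * b ^ e % m := by
  intro e
  induction e using Nat.strong_induction_on with
  | _ e ih =>
      intro b acc hacc
      rw [pvPowModGo]
      by_cases h : e = 0
      · simp [h, hacc]
      · rw [dif_neg h, ih (e / 2) (Nat.div_lt_self (Nat.pos_of_ne_zero h) (by norm_num)) _ _
          (by split_ifs with hp
              · exact Int.emod_emod_of_dvd _ dvd_rfl
              · exact hacc)]
        split_ifs with hp
        · have hb : b ^ e = (b*b)^(e/2) * b := by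
            calc b^e = b^(2*(e/2)+1) := by congr 1; omega
              _ = b^(2*(e/2)) * b := pow_succ _ _
              _ = (b^2)^(e/2) * b := by rw [pow_mul]
              _ = (b*b)^(e/2) * b := by ring
          rw [Int.mul_emod, Int.emod_emod_of_dvd _ dvd_rfl, pvPow_emod, ← Int.mul_emod, hb]
          ring_nf
        · have hb : b ^ e = (b*b)^(e/2) := by
            calc b^e = b^(2*(e/2)) := by congr 1; omega
              _ = (b^2)^(e/2) := by rw [pow_mul]
              _ = (b*b)^(e/2) := by ring
          rw [Int.mul_emod, pvPow_emod, ← Int.mul_emod, hb]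

theorem pvPowMod_eq (b : Int) (e : Nat) : pvPowMod b e pvM = PySem.Int.powMod b e pvM := by
  unfold pvPowMod PySem.Int.powMod
  rw [pvmod_eq, pvPowModGo_spec pvM e (b % pvM) (1 % pvM) (Int.emod_emod_of_dvd _ dvd_rfl),
    Int.mul_emod, Int.emod_emod_of_dvd _ dvd_rfl, pvPow_emod, ← Int.mul_emod, one_mul]

-- A-side loop invariant
theorem pvLemA (k : Int) (a : List Int) (m : Nat) :
    (PySem.List.pyRange 0 (m : Int) 1).foldl (fun (st : List Int × List Int) i =>
      let l := st.1
      let res := st.2 ++ [PySem.Int.mod (((PySem.List.pyRange 0 (i+1) 1).map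
        (fun j => PySem.Int.mod (PySem.List.pyGetD l j 0 * PySem.List.pyGetD a (i - j) 0) pvM)).sum) pvM]
      let next_l := PySem.Int.mod (PySem.List.pyGetD l (-1) 0 * (i + k)) pvM
      let inv_denominator := pvPowMod (i+1) 1000000005 pvM
      (l ++ [PySem.Int.mod (next_l * inv_denominator) pvM], res))
    ([1], [])
    = ((PySem.List.pyRange 0 ((m : Int)+1) 1).map (pvC k),
       (PySem.List.pyRange 0 (m : Int) 1).map (pvOutA k a)) := by
  induction m with
  | zero =>
      have h1 : PySem.List.pyRange 0 1 1 = [0] := by decide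
      simp [PySem.List.pyRange_one_eq_nil (le_refl (0:Int)), h1, pvC, pvCoef]
  | succ m ih =>
      have h0 : (0:Int) ≤ (m:Int) := by positivity
      rw [show ((m+1:Nat):Int) = (m:Int)+1 by push_cast; ring,
        PySem.List.pyRange_one_succ_right h0, List.foldl_append, ih]
      simp only [List.foldl_cons, List.foldl_nil, Prod.mk.injEq]
      have hCsucc : pvC k ((m:Int)+1)
          = PySem.Int.mod (PySem.Int.mod (pvC k (m:Int) * ((m:Int) + k)) pvM *
              pvPowMod ((m:Int)+1) 1000000005 pvM) pvM := by
        rw [pvPowMod_eq]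
        show pvCoef k (((m:Int)+1).toNat) = _
        rw [show ((m:Int)+1).toNat = m+1 by omega]
        show PySem.Int.mod (PySem.Int.mod (pvCoef k m * ((m:Int) + k)) pvM *
              PySem.Int.powMod ((m:Int)+1) 1000000005 pvM) pvM = _
        rw [show pvC k (m:Int) = pvCoef k m by simp [pvC]]
      have hg : ∀ j ∈ PySem.List.pyRange 0 ((m:Int)+1) 1,
          PySem.Int.mod (PySem.List.pyGetD ((PySem.List.pyRange 0 ((m:Int)+1) 1).map (pvC k)) j 0
            * PySem.List.pyGetD a ((m:Int) - j) 0) pvM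
          = PySem.Int.mod (pvC k j * PySem.List.pyGetD a ((m:Int) - j) 0) pvM := by
        intro j hj
        rw [PySem.List.pyGetD_map_pyRange_of_nonneg _ _ _ _
          ((PySem.List.mem_pyRange_one.mp hj).1) ((PySem.List.mem_pyRange_one.mp hj).2)]
      refine ⟨?_, ?_⟩
      · rw [PySem.List.pyRange_one_succ_right (show (0:Int) ≤ (m:Int)+1 by positivity),
          PySem.List.pyRange_one_succ_right h0]
        simp only [List.map_append, List.map_cons, List.map_nil]
        rw [PySem.List.pyGetD_neg_one_append_singleton, ← hCsucc]
      · rw [List.map_append]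
        simp only [List.map_cons, List.map_nil]
        refine congrArg₂ (· ++ ·) rfl (congrArg (fun x => [x]) ?_)
        rw [List.map_congr_left hg]
        rfl

-- B-side loop invariant
theorem pvLemB (n k : Int) (a : List Int) (hn : 0 ≤ n) (m : Nat) (hm : (m : Int) ≤ n) :
    (PySem.List.pyRange 0 (m : Int) 1).foldl (fun (st : List Int × Int) j =>
      let lj := st.2
      let res := (PySem.List.enumerate st.1).map (fun p =>
        if p.1 ≥ j then PySem.Int.mod (p.2 + lj * PySem.List.pyGetD a (p.1 - j) 0) pvM else p.2)
      (res, PySem.Int.mod (PySem.Int.mod (lj * (j + k)) pvM * pvPowMod (j+1) 1000000005 pvM) pvM))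
    (List.replicate n.toNat 0, 1)
    = ((PySem.List.pyRange 0 n 1).map (fun i => pvPart k a i m), pvCoef k m) := by
  induction m with
  | zero =>
      simp only [Nat.cast_zero, PySem.List.pyRange_one_eq_nil (le_refl (0:Int)), List.foldl_nil]
      refine Prod.ext ?_ rfl
      have : (PySem.List.pyRange 0 n 1).map (fun i => pvPart k a i 0)
          = (PySem.List.pyRange 0 n 1).map (fun _ => (0:Int)) := by
        refine List.map_congr_left (fun i _ => ?_)
        simp [pvPart, PySem.List.pyRange_one_eq_nil (le_refl (0:Int))]
      rw [this, List.map_const', PySem.List.length_pyRange_one]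
      simp
  | succ m ih =>
      have h0 : (0:Int) ≤ (m:Int) := by positivity
      have hm' : (m:Int) ≤ n := by push_cast at hm ⊢; omega
      rw [show ((m+1:Nat):Int) = (m:Int)+1 by push_cast; ring,
        PySem.List.pyRange_one_succ_right h0, List.foldl_append, ih hm']
      simp only [List.foldl_cons, List.foldl_nil, Prod.mk.injEq]
      constructor
      · rw [PySem.List.enumerate_eq_map_pyRange _ (0:Int), List.map_map]
        have hlenI : PySem.List.len ((PySem.List.pyRange 0 n 1).map (fun i => pvPart k a i m)) = n := by
          simp [PySem.List.len_eq, PySem.List.length_pyRange_one]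
          omega
        rw [hlenI]
        refine List.map_congr_left (fun i hi => ?_)
        obtain ⟨hi0, hin⟩ := PySem.List.mem_pyRange_one.mp hi
        simp only [Function.comp]
        rw [PySem.List.pyGetD_map_pyRange_of_nonneg _ _ _ _ hi0 hin]
        have hstep : pvPart k a i (m+1)
            = if i ≥ (m:Int) then PySem.Int.mod (pvPart k a i m + pvC k (m:Int) * PySem.List.pyGetD a (i - (m:Int)) 0) pvM
              else pvPart k a i m := by
          unfold pvPart
          rw [show ((m+1:Nat):Int) = (m:Int)+1 by push_cast; ring,
            PySem.List.pyRange_one_succ_right h0, List.foldl_append]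
          simp only [List.foldl_cons, List.foldl_nil]
        rw [hstep]
        simp [pvC]
      · have : ((m:Int)).toNat = m := by omega
        simp [pvCoef, pvPowMod_eq]

-- pvPart is unchanged by columns beyond i
theorem pvPart_stable (k : Int) (a : List Int) (i : Int) (J d : Nat) (hi : i < (J : Int)) :
    pvPart k a i (J + d) = pvPart k a i J := by
  induction d with
  | zero => rfl
  | succ d ih =>
      have h : (0:Int) ≤ ((J + d : Nat) : Int) := by positivity
      unfold pvPart
      rw [show ((J + (d+1) : Nat) : Int) = ((J + d : Nat) : Int) + 1 by push_cast; ring,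
        PySem.List.pyRange_one_succ_right h, List.foldl_append]
      simp only [List.foldl_cons, List.foldl_nil]
      rw [if_neg (by push_cast; omega)]
      exact ih

-- for J ≤ i+1 all columns fire and pvPart is the running-mod sum
theorem pvPart_sum (k : Int) (a : List Int) (i : Int) (J : Nat) (hJ : (J : Int) ≤ i + 1) :
    pvPart k a i J =
      (((PySem.List.pyRange 0 (J : Int) 1).map (fun j => pvC k j * PySem.List.pyGetD a (i - j) 0)).sum) % pvM := by
  induction J with
  | zero => simp [pvPart, PySem.List.pyRange_one_eq_nil, pvM]
  | succ J ih =>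
      have h0 : (0:Int) ≤ (J : Int) := by positivity
      have hJ' : (J : Int) ≤ i + 1 := by push_cast at hJ ⊢; omega
      unfold pvPart at ih ⊢
      rw [show ((J + 1 : Nat) : Int) = (J : Int) + 1 by push_cast; ring,
        PySem.List.pyRange_one_succ_right h0, List.foldl_append, List.map_append, List.sum_append]
      simp only [List.foldl_cons, List.foldl_nil, List.map_cons, List.map_nil, List.sum_cons,
        List.sum_nil]
      rw [if_pos (by push_cast at hJ ⊢; omega), ih hJ', pvmod_eq, add_zero,
        Int.add_emod _ (pvC k (J:Int) * _), Int.emod_emod_of_dvd _ dvd_rfl,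
        ← Int.add_emod]

-- mod of a sum of mods is mod of the sum
theorem pvSumMod (L : List Int) (f : Int → Int) :
    ((L.map (fun j => (f j) % pvM)).sum) % pvM = ((L.map f).sum) % pvM := by
  induction L with
  | nil => rfl
  | cons x L ih =>
      simp only [List.map_cons, List.sum_cons]
      rw [Int.add_emod, Int.emod_emod_of_dvd _ dvd_rfl, ih, ← Int.add_emod]

-- ===== VERDICT (by name: the statement is the Claim_ definition above) =====
theorem generate_expected_output_py_spec : Claim_equal_generate_expected_output_py := by
  intro n k a _hdom _hpre
  unfold Spec_generate_expected_output_py generate_expected_output_py generate_expected_output_py_alt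
  by_cases hn : 0 ≤ n
  · obtain ⟨m, rfl⟩ := Int.eq_ofNat_of_zero_le hn
    rw [pvLemA k a m, pvLemB (m:Int) k a hn m (le_refl _)]
    refine List.map_congr_left (fun i hi => ?_)
    obtain ⟨hi0, him⟩ := PySem.List.mem_pyRange_one.mp hi
    have hJ : ((i.toNat + 1 : Nat) : Int) = i + 1 := by omega
    have hA : pvOutA k a i
        = (((PySem.List.pyRange 0 (i+1) 1).map (fun j => pvC k j * PySem.List.pyGetD a (i - j) 0)).sum) % pvM := by
      simp only [pvOutA, pvmod_eq]
      exact pvSumMod _ _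
    have hB : pvPart k a i m
        = (((PySem.List.pyRange 0 (i+1) 1).map (fun j => pvC k j * PySem.List.pyGetD a (i - j) 0)).sum) % pvM := by
      calc pvPart k a i m
          = pvPart k a i ((i.toNat+1) + (m - (i.toNat+1))) := by
            rw [show (i.toNat+1) + (m - (i.toNat+1)) = m by omega]
        _ = pvPart k a i (i.toNat+1) := pvPart_stable k a i _ _ (by omega)
        _ = (((PySem.List.pyRange 0 ((i.toNat+1 : Nat) : Int) 1).map
              (fun j => pvC k j * PySem.List.pyGetD a (i - j) 0)).sum) % pvM :=
            pvPart_sum k a i _ (by omega)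
        _ = _ := by rw [hJ]
    exact hA.trans hB.symm
  · simp [PySem.List.pyRange_one_eq_nil (by omega : n ≤ (0:Int)),
      Int.toNat_of_nonpos (by omega : n ≤ 0)]
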